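-- pv_equiv track=rewrite | github.com/SvStranik/clear_code | task3.py | UFO
-- ===== SOURCE A (Python) =====
-- def UFO(N,data,octal):
--     degree = (8 if octal == True else 16)
--     result = []
--     for number_data in data:
--         temp_summ_result = 0
--         for position in range(len(str(number_data))):
--             temp_summ_result += (int(str(number_data)[position]) *
--                                 degree ** (len(str(number_data))-position-1))
--         result.append(temp_summ_result)
--     return result
-- ===== SOURCE B (Python) =====
-- def UFO(N, data, octal):
--     degree = (8 if octal == True else 16)
--     out = []
--     for n in data:
--         acc = 0
--         for ch in str(n):
--             acc = acc * degree + int(ch)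
--         out.append(acc)
--     return out
-- ===== Notes on version B (the rewrite author's own statement) =====
-- stated objective: simpler
-- what changed: Replaces the positional-power sum (indexing str(n) by range(len) and computing degree**(len-pos-1) for every digit) with a single Horner pass over the characters (acc = acc*degree + int(ch)), removing all indexing and exponentiation.
import Mathlib
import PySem

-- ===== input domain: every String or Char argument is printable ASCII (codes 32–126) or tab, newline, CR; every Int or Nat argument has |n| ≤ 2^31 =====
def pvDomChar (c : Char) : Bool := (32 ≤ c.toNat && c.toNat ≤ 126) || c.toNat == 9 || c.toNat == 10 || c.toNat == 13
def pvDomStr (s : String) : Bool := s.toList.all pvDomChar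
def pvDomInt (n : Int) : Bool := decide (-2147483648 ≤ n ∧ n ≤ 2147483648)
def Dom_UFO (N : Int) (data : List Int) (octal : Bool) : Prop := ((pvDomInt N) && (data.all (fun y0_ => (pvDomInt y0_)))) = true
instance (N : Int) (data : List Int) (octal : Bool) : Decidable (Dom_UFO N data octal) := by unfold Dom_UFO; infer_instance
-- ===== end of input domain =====

-- B replaces the per-digit power sum with a single Horner pass per number (no indexing, no
-- exponentiation); same return value on all lists of nonnegative ints.

-- int(str(n)[pos]) / int(ch) on a single character; exact where that character is a decimal
-- digit (always the case under Pre_, since str(n) for 0 ≤ n consists of digits); the .getD 0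
-- stands in for Python's ValueError, which Pre_ excludes.
def pvDigitVal (c : Char) : Int := (PySem.Int.ofChars? [c]).getD 0

-- ===== PORT A =====
def UFO (N : Int) (data : List Int) (octal : Bool) : List Int :=
  let degree : Int := if octal == true then 8 else 16
  data.foldl (fun result number_data =>
    let s := PySem.Int.toChars number_data
    -- for position in range(len(str(number_data))): temp += int(s[position]) * degree**(len-position-1)
    let temp := (PySem.List.pyRange 0 (s.length : Int) 1).foldl
      (fun acc position =>
        acc + pvDigitVal (PySem.List.pyGetD s position ' ') *
          degree ^ (((s.length : Int) - position - 1).toNat)) 0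
    result ++ [temp]) []

-- ===== PORT B =====
def UFO_alt (N : Int) (data : List Int) (octal : Bool) : List Int :=
  let degree : Int := if octal == true then 8 else 16
  data.foldl (fun out n =>
    out ++ [(PySem.Int.toChars n).foldl (fun acc ch => acc * degree + pvDigitVal ch) 0]) []

-- ===== PRECONDITION & SPEC =====
-- A calls int() on each character of str(n); for negative n the leading '-' makes it raise
-- ValueError, so Pre_ admits exactly the lists of nonnegative ints.
def Pre_UFO (N : Int) (data : List Int) (octal : Bool) : Prop := ∀ n ∈ data, 0 ≤ n
instance (N : Int) (data : List Int) (octal : Bool) : Decidable (Pre_UFO N data octal) := by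
  unfold Pre_UFO; infer_instance

def pvWitness_UFO : Int × List Int × Bool := (0, [7, 19, 0], true)

def Spec_UFO (N : Int) (data : List Int) (octal : Bool) (out : List Int) : Prop := out = UFO_alt N data octal
instance (N : Int) (data : List Int) (octal : Bool) (out : List Int) : Decidable (Spec_UFO N data octal out) := by unfold Spec_UFO; infer_instance

-- ===== CLAIM (what is proved, stated in full; the proofs are below) =====
def Claim_equal_UFO : Prop := ∀ (N : Int) (data : List Int) (octal : Bool), Dom_UFO N data octal → Pre_UFO N data octal → Spec_UFO N data octal (UFO N data octal)

-- ===== LEMMAS AND PROOFS =====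

-- The positional sum A computes over a character list, written over Nat indices.
def pvPosSum (d : Int) (cs : List Char) : Int :=
  ((List.range cs.length).map (fun k => pvDigitVal (cs.getD k ' ') * d ^ (cs.length - 1 - k))).sum

lemma pvPosSum_append_singleton (d : Int) (cs : List Char) (c : Char) :
    pvPosSum d (cs ++ [c]) = pvPosSum d cs * d + pvDigitVal c := by
  unfold pvPosSum
  simp only [List.length_append, List.length_singleton, List.range_succ, List.map_append,
    List.sum_append, List.map_cons, List.map_nil, List.sum_cons, List.sum_nil]
  have hlast : (cs ++ [c]).getD cs.length ' ' = c := by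
    simp [List.getD]
  rw [hlast]
  have hpow : cs.length + 1 - 1 - cs.length = 0 := by omega
  rw [hpow, pow_zero, mul_one]
  congr 1
  · rw [mul_comm]
    rw [← List.sum_map_mul_left]
    apply congrArg
    apply List.map_congr_left
    intro k hk
    rw [List.mem_range] at hk
    have hget : (cs ++ [c]).getD k ' ' = cs.getD k ' ' := by
      simp [List.getD, List.getElem?_append_left hk]
    rw [hget]
    have h1 : cs.length + 1 - 1 - k = (cs.length - 1 - k) + 1 := by omega
    rw [h1, pow_succ]
    ring
  · simp

-- Horner's rule: B's per-number fold computes A's positional sum.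
lemma pvHorner_eq_posSum (d : Int) (cs : List Char) :
    cs.foldl (fun acc ch => acc * d + pvDigitVal ch) 0 = pvPosSum d cs := by
  induction cs using List.reverseRecOn with
  | nil => simp [pvPosSum]
  | append_singleton cs c ih =>
      rw [List.foldl_append, List.foldl_cons, List.foldl_nil, ih,
        pvPosSum_append_singleton]

-- A's inner loop over range(len(s)) with Int indices equals the Nat-indexed positional sum.
lemma pvInner_eq_posSum (d : Int) (cs : List Char) :
    (PySem.List.pyRange 0 (cs.length : Int) 1).foldl
      (fun acc position =>
        acc + pvDigitVal (PySem.List.pyGetD cs position ' ') *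
          d ^ (((cs.length : Int) - position - 1).toNat)) 0 = pvPosSum d cs := by
  rw [PySem.List.foldl_add]
  rw [PySem.List.pyRange_one, List.map_map]
  unfold pvPosSum
  rw [Int.zero_add, Int.sub_zero, Int.toNat_natCast]
  apply congrArg
  apply List.map_congr_left
  intro k hk
  rw [List.mem_range] at hk
  simp only [Function.comp_apply, zero_add, PySem.List.pyGetD_natCast]
  congr 1
  congr 1
  omega

-- ===== VERDICT (by name: the statement is the Claim_ definition above) =====
theorem UFO_spec : Claim_equal_UFO := by
  intro N data octal _ _
  unfold Spec_UFO UFO UFO_alt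
  rw [PySem.List.foldl_append_singleton_eq_map
      (f := fun number_data =>
        (PySem.List.pyRange 0 ((PySem.Int.toChars number_data).length : Int) 1).foldl
          (fun acc position =>
            acc + pvDigitVal (PySem.List.pyGetD (PySem.Int.toChars number_data) position ' ') *
              (if octal == true then (8:Int) else 16) ^
                ((((PySem.Int.toChars number_data).length : Int) - position - 1).toNat)) 0),
    PySem.List.foldl_append_singleton_eq_map
      (f := fun n => (PySem.Int.toChars n).foldl
        (fun acc ch => acc * (if octal == true then (8:Int) else 16) + pvDigitVal ch) 0)]
  simp only [List.nil_append]
  apply List.map_congr_left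
  intro n _
  rw [pvHorner_eq_posSum, pvInner_eq_posSum]
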